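-- pv_equiv track=rewrite | github.com/osu-kbs-capstone-sp2026-brew/LeVision | nba_pipeline/query_executor.py | _combined_status
-- ===== SOURCE A (Python) =====
-- from typing import Any, Optional
--
-- def _combined_status(results: list[dict[str, Any]]) -> str:
--     statuses = [str(item.get("status") or "") for item in results]
--     if not statuses:
--         return "error"
--     if any(status == "clarification" for status in statuses):
--         return "clarification"
--     if all(status in {"ok", "no_data"} for status in statuses):
--         return "ok" if any(status == "ok" for status in statuses) else "no_data"
--     if any(status == "error" for status in statuses) and any(status in {"ok", "no_data"} for status in statuses):
--         return "partial"
--     if all(status == "error" for status in statuses):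
--         return "error"
--     return "partial"
-- ===== SOURCE B (Python) =====
-- from typing import Any
--
-- _NAMES = ("no_data", "ok", "error", "partial", "clarification")
-- _CODE = {"clarification": 4, "ok": 1, "no_data": 0, "error": 2}
--
--
-- def _join(a: int, b: int) -> int:
--     # join in the status lattice: no_data(0) < ok(1) < partial(3) < clarification(4),
--     # with error(2) below partial and incomparable to ok/no_data
--     if a == b:
--         return a
--     hi, lo = (a, b) if a > b else (b, a)
--     if hi == 4:
--         return 4
--     if hi == 2 or lo == 2:
--         return 3
--     return hi
--
--
-- def _code(item: dict[str, Any]) -> int: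
--     return _CODE.get(str(item.get("status") or ""), 3)
--
--
-- def _combined_status(results: list[dict[str, Any]]) -> str:
--     if not results:
--         return "error"
--     acc = _code(results[0])
--     for item in results[1:]:
--         acc = _join(acc, _code(item))
--     return _NAMES[acc]
-- ===== Notes on version B (the rewrite author's own statement) =====
-- stated objective: alternative
-- what changed: B classifies each item once into a numeric status code and folds an associative lattice join (no_data < ok < partial < clarification, error joining with ok/no_data to partial) over the list in a single pass, instead of A's ordered chain of whole-list any/all scans.
import Mathlib
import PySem

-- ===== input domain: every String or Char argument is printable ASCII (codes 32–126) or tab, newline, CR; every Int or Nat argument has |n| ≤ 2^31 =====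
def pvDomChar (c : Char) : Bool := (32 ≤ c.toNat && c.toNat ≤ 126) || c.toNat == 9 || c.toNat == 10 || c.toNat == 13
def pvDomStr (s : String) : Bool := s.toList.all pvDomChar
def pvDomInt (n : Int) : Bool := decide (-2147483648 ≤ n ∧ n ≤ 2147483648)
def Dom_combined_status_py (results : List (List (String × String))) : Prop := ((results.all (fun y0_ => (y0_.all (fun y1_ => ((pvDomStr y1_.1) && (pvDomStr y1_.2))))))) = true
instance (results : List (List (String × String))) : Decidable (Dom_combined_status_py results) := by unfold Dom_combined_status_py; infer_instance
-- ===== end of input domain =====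

-- B replaces A's ordered chain of whole-list any/all scans by a single left-to-right pass
-- folding an associative lattice join over per-item status codes (alternative algorithm).

-- shared helper: str(item.get("status") or "")  (values are strings, so str() is identity and
-- the only falsy value re-mapped by `or ""` is None → "" = getD "")
def pvStatusOf (item : List (String × String)) : String :=
  PySem.Dict.getD (PySem.Dict.mk item) "status" ""

-- ===== PORT A =====
def combined_status_py (results : List (List (String × String))) : String :=
  let statuses := results.map pvStatusOf
  if statuses.isEmpty then "error"
  else if statuses.any (fun s => s == "clarification") then "clarification"
  else if statuses.all (fun s => s == "ok" || s == "no_data") then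
    (if statuses.any (fun s => s == "ok") then "ok" else "no_data")
  else if statuses.any (fun s => s == "error") && statuses.any (fun s => s == "ok" || s == "no_data") then
    "partial"
  else if statuses.all (fun s => s == "error") then "error"
  else "partial"

-- ===== PORT B =====
-- _CODE.get(status, 3)
def pvCode (item : List (String × String)) : Nat :=
  PySem.Dict.getD (PySem.Dict.mk [("clarification", 4), ("ok", 1), ("no_data", 0), ("error", 2)]) (pvStatusOf item) 3

-- _join(a, b): join in the status lattice
def pvJoin (a b : Nat) : Nat :=
  if a == b then a
  else
    let hi := if a > b then a else b
    let lo := if a > b then b else a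
    if hi == 4 then 4
    else if hi == 2 || lo == 2 then 3
    else hi

-- _NAMES[acc]  (tuple index; acc is always 0..4, so the `getD ""` default is unreachable)
def pvRender (acc : Nat) : String :=
  (PySem.List.pyGet? ["no_data", "ok", "error", "partial", "clarification"] (Int.ofNat acc)).getD ""

def combined_status_py_alt (results : List (List (String × String))) : String :=
  match results with
  | [] => "error"
  | r0 :: rest => pvRender (rest.foldl (fun acc item => pvJoin acc (pvCode item)) (pvCode r0))

-- ===== PRECONDITION & SPEC =====
def Spec_combined_status_py (results : List (List (String × String))) (out : String) : Prop := out = combined_status_py_alt results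
instance (results : List (List (String × String))) (out : String) : Decidable (Spec_combined_status_py results out) := by unfold Spec_combined_status_py; infer_instance

-- ===== CLAIM (what is proved, stated in full; the proofs are below) =====
def Claim_equal_combined_status_py : Prop := ∀ (results : List (List (String × String))), Dom_combined_status_py results → Spec_combined_status_py results (combined_status_py results)

-- ===== LEMMAS AND PROOFS =====

-- "none of the four known statuses"
def pvOtherB (s : String) : Bool := !(s == "ok" || s == "no_data" || s == "error" || s == "clarification")

-- value of the join-fold as a function of which status categories occur
def pvC (d4 d3 d2 d1 d0 : Bool) : Nat :=
  if d4 then 4 else if d3 then 3 else if d2 && (d1 || d0) then 3 else if d2 then 2 else if d1 then 1 else 0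

theorem pv_code_cases (item : List (String × String)) :
    pvCode item =
      (if pvStatusOf item == "clarification" then 4
       else if pvStatusOf item == "ok" then 1
       else if pvStatusOf item == "no_data" then 0
       else if pvStatusOf item == "error" then 2 else 3) := by
  unfold pvCode
  by_cases h1 : pvStatusOf item = "clarification"; · rw [h1]; decide
  by_cases h2 : pvStatusOf item = "ok"; · rw [h2]; decide
  by_cases h3 : pvStatusOf item = "no_data"; · rw [h3]; decide
  by_cases h4 : pvStatusOf item = "error"; · rw [h4]; decide
  have g1 : ¬ ("clarification" = pvStatusOf item) := fun h => h1 h.symm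
  have g2 : ¬ ("ok" = pvStatusOf item) := fun h => h2 h.symm
  have g3 : ¬ ("no_data" = pvStatusOf item) := fun h => h3 h.symm
  have g4 : ¬ ("error" = pvStatusOf item) := fun h => h4 h.symm
  simp [PySem.Dict.getD_eq_get?_getD, PySem.Dict.get?_mk_cons,
    g1, g2, g3, g4, h1, h2, h3, h4]
  rfl

theorem pv_code_le (item : List (String × String)) : pvCode item ≤ 4 := by
  rw [pv_code_cases]; split_ifs <;> omega

theorem pv_code_eq4 (item : List (String × String)) :
    (pvCode item == 4) = (pvStatusOf item == "clarification") := by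
  rw [pv_code_cases]
  by_cases h1 : pvStatusOf item = "clarification"; · simp [h1]
  by_cases h2 : pvStatusOf item = "ok"; · simp [h1, h2]
  by_cases h3 : pvStatusOf item = "no_data"; · simp [h1, h2, h3]
  by_cases h4 : pvStatusOf item = "error"; · simp [h1, h2, h3, h4]
  simp [h1, h2, h3, h4]

theorem pv_code_eq3 (item : List (String × String)) :
    (pvCode item == 3) = pvOtherB (pvStatusOf item) := by
  rw [pv_code_cases]; unfold pvOtherB
  by_cases h1 : pvStatusOf item = "clarification"; · simp [h1]
  by_cases h2 : pvStatusOf item = "ok"; · simp [h1, h2]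
  by_cases h3 : pvStatusOf item = "no_data"; · simp [h1, h2, h3]
  by_cases h4 : pvStatusOf item = "error"; · simp [h1, h2, h3, h4]
  simp [h1, h2, h3, h4]

theorem pv_code_eq2 (item : List (String × String)) :
    (pvCode item == 2) = (pvStatusOf item == "error") := by
  rw [pv_code_cases]
  by_cases h1 : pvStatusOf item = "clarification"; · simp [h1]
  by_cases h2 : pvStatusOf item = "ok"; · simp [h1, h2]
  by_cases h3 : pvStatusOf item = "no_data"; · simp [h1, h2, h3]
  by_cases h4 : pvStatusOf item = "error"; · simp [h1, h2, h3, h4]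
  simp [h1, h2, h3, h4]

theorem pv_code_eq1 (item : List (String × String)) :
    (pvCode item == 1) = (pvStatusOf item == "ok") := by
  rw [pv_code_cases]
  by_cases h1 : pvStatusOf item = "clarification"; · simp [h1]
  by_cases h2 : pvStatusOf item = "ok"; · simp [h1, h2]
  by_cases h3 : pvStatusOf item = "no_data"; · simp [h1, h2, h3]
  by_cases h4 : pvStatusOf item = "error"; · simp [h1, h2, h3, h4]
  simp [h1, h2, h3, h4]

theorem pv_code_eq0 (item : List (String × String)) :
    (pvCode item == 0) = (pvStatusOf item == "no_data") := by
  rw [pv_code_cases]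
  by_cases h1 : pvStatusOf item = "clarification"; · simp [h1]
  by_cases h2 : pvStatusOf item = "ok"; · simp [h1, h2]
  by_cases h3 : pvStatusOf item = "no_data"; · simp [h1, h2, h3]
  by_cases h4 : pvStatusOf item = "error"; · simp [h1, h2, h3, h4]
  simp [h1, h2, h3, h4]

theorem pv_join_le {a b : Nat} (ha : a ≤ 4) (hb : b ≤ 4) : pvJoin a b ≤ 4 := by
  interval_cases a <;> interval_cases b <;> decide

-- absorbing one joined element into the category bits
theorem pv_C_step (a b : Nat) (ha : a ≤ 4) (hb : b ≤ 4) :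
    ∀ c4 c3 c2 c1 c0 : Bool,
      pvC ((pvJoin a b == 4) || c4) ((pvJoin a b == 3) || c3) ((pvJoin a b == 2) || c2)
          ((pvJoin a b == 1) || c1) ((pvJoin a b == 0) || c0)
      = pvC ((a == 4) || ((b == 4) || c4)) ((a == 3) || ((b == 3) || c3))
            ((a == 2) || ((b == 2) || c2)) ((a == 1) || ((b == 1) || c1))
            ((a == 0) || ((b == 0) || c0)) := by
  interval_cases a <;> interval_cases b <;> decide

-- the join-fold computes pvC of the presence bits
theorem pv_fold_char (vs : List Nat) :
    ∀ a, a ≤ 4 → (∀ x ∈ vs, x ≤ 4) →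
      List.foldl pvJoin a vs
        = pvC ((a == 4) || vs.any (· == 4)) ((a == 3) || vs.any (· == 3))
              ((a == 2) || vs.any (· == 2)) ((a == 1) || vs.any (· == 1))
              ((a == 0) || vs.any (· == 0)) := by
  induction vs with
  | nil =>
    intro a ha _
    simp only [List.foldl_nil, List.any_nil, Bool.or_false]
    interval_cases a <;> decide
  | cons b vs ih =>
    intro a ha hall
    simp only [List.foldl_cons, List.any_cons]
    rw [ih (pvJoin a b) (pv_join_le ha (hall b List.mem_cons_self))
        (fun x hx => hall x (List.mem_cons_of_mem b hx))]
    exact pv_C_step a b ha (hall b List.mem_cons_self) _ _ _ _ _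

-- pointwise category facts about the four status literals
theorem pv_pt_okish (s : String) :
    (s == "ok" || s == "no_data")
      = (!(s == "clarification") && !pvOtherB s && !(s == "error")) := by
  unfold pvOtherB
  by_cases h1 : s = "clarification"; · simp [h1]
  by_cases h2 : s = "ok"; · simp [h1, h2]
  by_cases h3 : s = "no_data"; · simp [h1, h2, h3]
  by_cases h4 : s = "error"; · simp [h1, h2, h3, h4]
  have e1 : (s == "clarification") = false := beq_eq_false_iff_ne.mpr h1
  have e2 : (s == "ok") = false := beq_eq_false_iff_ne.mpr h2
  have e3 : (s == "no_data") = false := beq_eq_false_iff_ne.mpr h3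
  have e4 : (s == "error") = false := beq_eq_false_iff_ne.mpr h4
  simp [e1, e2, e3, e4]

theorem pv_pt_error (s : String) :
    (s == "error")
      = (!(s == "clarification") && !pvOtherB s && !(s == "ok") && !(s == "no_data")) := by
  unfold pvOtherB
  by_cases h1 : s = "clarification"; · simp [h1]
  by_cases h2 : s = "ok"; · simp [h1, h2]
  by_cases h3 : s = "no_data"; · simp [h1, h2, h3]
  by_cases h4 : s = "error"; · simp [h1, h2, h3, h4]
  have e1 : (s == "clarification") = false := beq_eq_false_iff_ne.mpr h1
  have e2 : (s == "ok") = false := beq_eq_false_iff_ne.mpr h2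
  have e3 : (s == "no_data") = false := beq_eq_false_iff_ne.mpr h3
  have e4 : (s == "error") = false := beq_eq_false_iff_ne.mpr h4
  simp [e1, e2, e3, e4]

-- A's `all` scans expressed through its `any` scans
theorem pv_all_okish (ss : List String) :
    ss.all (fun s => s == "ok" || s == "no_data")
      = (!ss.any (· == "clarification") && !ss.any pvOtherB && !ss.any (· == "error")) := by
  induction ss with
  | nil => rfl
  | cons s ss ih =>
    simp only [List.all_cons, List.any_cons, Bool.not_or, pv_pt_okish s, ih]
    cases s == "clarification" <;> cases pvOtherB s <;> cases s == "error" <;>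
      cases ss.any (· == "clarification") <;> cases ss.any pvOtherB <;>
      cases ss.any (· == "error") <;> rfl

theorem pv_all_error (ss : List String) :
    ss.all (fun s => s == "error")
      = (!ss.any (· == "clarification") && !ss.any pvOtherB
          && !ss.any (· == "ok") && !ss.any (· == "no_data")) := by
  induction ss with
  | nil => rfl
  | cons s ss ih =>
    simp only [List.all_cons, List.any_cons, Bool.not_or, pv_pt_error s, ih]
    cases s == "clarification" <;> cases pvOtherB s <;> cases s == "ok" <;>
      cases s == "no_data" <;> cases ss.any (· == "clarification") <;>
      cases ss.any pvOtherB <;> cases ss.any (· == "ok") <;>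
      cases ss.any (· == "no_data") <;> rfl

theorem pv_any_okish (ss : List String) :
    ss.any (fun s => s == "ok" || s == "no_data")
      = (ss.any (· == "ok") || ss.any (· == "no_data")) := by
  induction ss with
  | nil => rfl
  | cons s ss ih =>
    simp only [List.any_cons, ih]
    cases s == "ok" <;> cases s == "no_data" <;> cases ss.any (· == "ok") <;>
      cases ss.any (· == "no_data") <;> rfl

-- A's branch chain, as a function of the five category bits, is the rendered join
theorem pv_bool_chain (c o e k n : Bool) :
    (if c then "clarification"
     else if !c && !o && !e then (if k then "ok" else "no_data")
     else if e && (k || n) then "partial"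
     else if !c && !o && !k && !n then "error"
     else "partial")
      = pvRender (pvC c o e k n) := by
  revert c o e k n; decide

-- ===== VERDICT (by name: the statement is the Claim_ definition above) =====
theorem combined_status_py_spec : Claim_equal_combined_status_py := by
  intro results _
  unfold Spec_combined_status_py
  cases results with
  | nil => rfl
  | cons r0 rest =>
    simp only [combined_status_py, combined_status_py_alt, List.map_cons, List.isEmpty_cons,
      Bool.false_eq_true, if_false]
    rw [← List.foldl_map,
        pv_fold_char (rest.map pvCode) (pvCode r0) (pv_code_le r0)
          (by intro x hx
              obtain ⟨it, _, rfl⟩ := List.mem_map.mp hx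
              exact pv_code_le it)]
    simp only [pv_all_okish, pv_all_error, pv_any_okish]
    simp only [List.any_cons, List.any_map, Function.comp_def,
      pv_code_eq4, pv_code_eq3, pv_code_eq2, pv_code_eq1, pv_code_eq0]
    exact pv_bool_chain _ _ _ _ _
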